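-- pv_equiv track=rewrite | github.com/pethai2004/TrainSLM | src/data_utility.py | constant_length_dataset
-- ===== SOURCE A (Python) =====
-- from typing import Iterable, List, Dict, Any, Optional
-- import math
--
-- def constant_length_dataset(
--         x: Dict[Any, List[List[int]]], seq_length: int = 1024,
--         threshold: int = 10, eos_token_id: int = 11,
--         pad_token_id: int = -100
-- ) -> Dict[Any, List[List[int]]]:
--     """
--     This function maps a dictionary of lists of integers into a dictionary of fixed-length sequences.
--     Args:
--     x (Dict[Any, List[List[int]]]): The input dictionary where the values are lists of lists of integers.
--     seq_length (int): The desired sequence length.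
--     threshold (int): If math.fabs(len(x[i]) - seq_length) < threshold, it will be padded to seq_length,
--                      otherwise will be normally concatenated with other batches.
--     eos_token_id (int): The token id that will be added to the end of each batch.
--     pad_token_id (int): The token id that will be used to pad the new batch for non-concatenated batch.
--
--     Returns:
--     Dict[Any, List[List[int]]]: A dictionary of fixed-length sequences.
--     """
--     results = {}
--
--     for key, value in x.items():
--         results[key] = []
--         block = []
--
--         # Initialize lists to separate batches that need padding and those to be concatenated
--         pad_batches = []
--         concat_batches = []
--
--         for batch in value:
--             if math.fabs(len(batch) - seq_length) <= threshold:
--                 pad_batches.append(batch)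
--             else:
--                 concat_batches.append(batch)
--
--         # Process padded batches
--         for batch in pad_batches:
--             padded_batch = batch + [pad_token_id] * (seq_length - len(batch))
--             results[key].append(padded_batch)
--
--         # Concatenate remaining batches
--         for batch in concat_batches:
--             block.extend(batch + [eos_token_id])
--             while len(block) >= seq_length:
--                 results[key].append(block[:seq_length])
--                 block = block[seq_length:]
--
--         # If there is still some element left
--         if len(block) > 0:
--             results[key].append(block + [pad_token_id] * (seq_length - len(block)))
--
--     return results
-- ===== SOURCE B (Python) =====
-- def constant_length_dataset(
--         x, seq_length=1024, threshold=10,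
--         eos_token_id=11, pad_token_id=-100):
--     results = {}
--     for key, value in x.items():
--         out = []
--         flat = []
--         for batch in value:
--             if abs(len(batch) - seq_length) <= threshold:
--                 out.append(batch + [pad_token_id] * (seq_length - len(batch)))
--             else:
--                 flat.extend(batch)
--                 flat.append(eos_token_id)
--         i = 0
--         n = len(flat)
--         while i < n:
--             chunk = flat[i:i + seq_length]
--             out.append(chunk + [pad_token_id] * (seq_length - len(chunk)))
--             i += seq_length
--         results[key] = out
--     return results
-- ===== Notes on version B (the rewrite author's own statement) =====
-- stated objective: alternative
-- what changed: B replaces A's two intermediate classification lists and its chunking loop that repeatedly re-slices the shrinking block (block = block[seq_length:]) with a single classification pass building one flat token list that is then cut at fixed offsets by an index pointer.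
import Mathlib
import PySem

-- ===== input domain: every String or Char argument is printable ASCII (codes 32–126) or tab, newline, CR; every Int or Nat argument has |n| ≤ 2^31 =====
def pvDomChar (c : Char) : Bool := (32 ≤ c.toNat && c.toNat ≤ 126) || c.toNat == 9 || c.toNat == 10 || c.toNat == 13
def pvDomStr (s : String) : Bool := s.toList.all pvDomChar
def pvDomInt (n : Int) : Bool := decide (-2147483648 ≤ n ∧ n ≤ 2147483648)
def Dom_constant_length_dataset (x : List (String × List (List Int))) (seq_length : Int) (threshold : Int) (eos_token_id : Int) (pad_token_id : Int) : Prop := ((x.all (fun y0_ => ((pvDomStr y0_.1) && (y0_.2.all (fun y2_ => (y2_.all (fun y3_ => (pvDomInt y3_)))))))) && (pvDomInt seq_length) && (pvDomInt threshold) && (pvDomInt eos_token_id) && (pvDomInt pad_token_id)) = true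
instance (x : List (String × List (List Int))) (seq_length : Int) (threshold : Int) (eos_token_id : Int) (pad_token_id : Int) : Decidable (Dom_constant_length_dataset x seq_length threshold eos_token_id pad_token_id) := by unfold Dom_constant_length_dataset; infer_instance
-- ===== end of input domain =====

-- B replaces A's pad/concat classification lists and its repeated `block = block[seq_length:]`
-- re-slicing with one classification pass plus an index pointer over one flat token list.

-- ===== PORT A =====
-- the `while len(block) >= seq_length` loop; fuel = block.length + 1 suffices whenever
-- seq_length ≥ 1 (each iteration removes seq_length ≥ 1 elements); for seq_length ≤ 0 the
-- Python loop diverges on a nonempty block, which Pre_ excludes.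
def pvAWhile (fuel : Nat) (seq_length : Int) (res : List (List Int)) (block : List Int) :
    List (List Int) × List Int :=
  match fuel with
  | 0 => (res, block)
  | f + 1 =>
    if seq_length ≤ (block.length : Int) then
      pvAWhile f seq_length (res ++ [PySem.List.slice block none (some seq_length)])
        (PySem.List.slice block (some seq_length) none)
    else (res, block)

def constant_length_dataset (x : List (String × List (List Int))) (seq_length : Int) (threshold : Int) (eos_token_id : Int) (pad_token_id : Int) : List (String × List (List Int)) :=
  x.foldl (fun results kv =>
    -- classification loop: pad_batches / concat_batches
    let pc := kv.2.foldl (fun (pc : List (List Int) × List (List Int)) batch =>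
      if |(batch.length : Int) - seq_length| ≤ threshold then (pc.1 ++ [batch], pc.2)
      else (pc.1, pc.2 ++ [batch])) ([], [])
    -- padded-batch loop
    let res1 := pc.1.foldl (fun res batch =>
      res ++ [batch ++ List.replicate (seq_length - (batch.length : Int)).toNat pad_token_id]) []
    -- concatenation loop with the inner while
    let st := pc.2.foldl (fun (st : List (List Int) × List Int) batch =>
      let block := st.2 ++ (batch ++ [eos_token_id])
      pvAWhile (block.length + 1) seq_length st.1 block) (res1, [])
    let res2 := if st.2 ≠ [] then
        st.1 ++ [st.2 ++ List.replicate (seq_length - (st.2.length : Int)).toNat pad_token_id]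
      else st.1
    results ++ [(kv.1, res2)]) []

-- ===== PORT B =====
-- B's index-pointer loop `while i < n`; fuel = flat.length + 1 suffices whenever
-- seq_length ≥ 1; for seq_length ≤ 0 the Python loop diverges on nonempty flat (excluded by Pre_).
def pvBWhile (fuel : Nat) (seq_length pad_token_id : Int) (flat : List Int) (i : Int)
    (out : List (List Int)) : List (List Int) :=
  match fuel with
  | 0 => out
  | f + 1 =>
    if i < (flat.length : Int) then
      let chunk := PySem.List.slice flat (some i) (some (i + seq_length))
      pvBWhile f seq_length pad_token_id flat (i + seq_length)
        (out ++ [chunk ++ List.replicate (seq_length - (chunk.length : Int)).toNat pad_token_id])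
    else out

def constant_length_dataset_alt (x : List (String × List (List Int))) (seq_length : Int) (threshold : Int) (eos_token_id : Int) (pad_token_id : Int) : List (String × List (List Int)) :=
  x.foldl (fun results kv =>
    -- one pass: pad in place or accumulate onto the flat token list
    let st := kv.2.foldl (fun (st : List (List Int) × List Int) batch =>
      if |(batch.length : Int) - seq_length| ≤ threshold then
        (st.1 ++ [batch ++ List.replicate (seq_length - (batch.length : Int)).toNat pad_token_id], st.2)
      else (st.1, st.2 ++ batch ++ [eos_token_id])) ([], [])
    let out := pvBWhile (st.2.length + 1) seq_length pad_token_id st.2 0 st.1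
    results ++ [(kv.1, out)]) []

-- ===== PRECONDITION & SPEC =====
-- Pre_ excludes exactly the inputs on which A never returns: with seq_length ≤ 0, A's inner
-- `while` loops forever as soon as any batch is routed to concatenation, so we require
-- seq_length ≥ 1 unless every batch is within threshold of seq_length (then nothing is concatenated).
def Pre_constant_length_dataset (x : List (String × List (List Int))) (seq_length : Int) (threshold : Int) (eos_token_id : Int) (pad_token_id : Int) : Prop :=
  1 ≤ seq_length ∨ ∀ kv ∈ x, ∀ batch ∈ kv.2, |(batch.length : Int) - seq_length| ≤ threshold
instance (x : List (String × List (List Int))) (seq_length : Int) (threshold : Int) (eos_token_id : Int) (pad_token_id : Int) : Decidable (Pre_constant_length_dataset x seq_length threshold eos_token_id pad_token_id) := by unfold Pre_constant_length_dataset; infer_instance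

def pvWitness_constant_length_dataset : (List (String × List (List Int))) × Int × Int × Int × Int :=
  ([("a", [[1, 2], [3, 4, 5, 6, 7], []]), ("b", [[9]])], 3, 1, 11, -100)

def Spec_constant_length_dataset (x : List (String × List (List Int))) (seq_length : Int) (threshold : Int) (eos_token_id : Int) (pad_token_id : Int) (out : List (String × List (List Int))) : Prop := out = constant_length_dataset_alt x seq_length threshold eos_token_id pad_token_id
instance (x : List (String × List (List Int))) (seq_length : Int) (threshold : Int) (eos_token_id : Int) (pad_token_id : Int) (out : List (String × List (List Int))) : Decidable (Spec_constant_length_dataset x seq_length threshold eos_token_id pad_token_id out) := by unfold Spec_constant_length_dataset; infer_instance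

-- ===== CLAIM (what is proved, stated in full; the proofs are below) =====
def Claim_equal_constant_length_dataset : Prop := ∀ (x : List (String × List (List Int))) (seq_length : Int) (threshold : Int) (eos_token_id : Int) (pad_token_id : Int), Dom_constant_length_dataset x seq_length threshold eos_token_id pad_token_id → Pre_constant_length_dataset x seq_length threshold eos_token_id pad_token_id → Spec_constant_length_dataset x seq_length threshold eos_token_id pad_token_id (constant_length_dataset x seq_length threshold eos_token_id pad_token_id)

-- ===== LEMMAS AND PROOFS =====


-- reference chunker: full chunks of length L off the front, plus the (padded) remainder
def pvChunks (L pad : Int) (b : List Int) : List (List Int) :=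
  if _h : 1 ≤ L ∧ L ≤ (b.length : Int) then
    b.take L.toNat :: pvChunks L pad (b.drop L.toNat)
  else if b = [] then [] else [b ++ List.replicate (L - (b.length : Int)).toNat pad]
termination_by b.length
decreasing_by
  simp only [List.length_drop]
  omega

def pvFull (L : Int) (b : List Int) : List (List Int) :=
  if _h : 1 ≤ L ∧ L ≤ (b.length : Int) then b.take L.toNat :: pvFull L (b.drop L.toNat) else []
termination_by b.length
decreasing_by
  simp only [List.length_drop]
  omega

def pvRem (L : Int) (b : List Int) : List Int :=
  if _h : 1 ≤ L ∧ L ≤ (b.length : Int) then pvRem L (b.drop L.toNat) else b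
termination_by b.length
decreasing_by
  simp only [List.length_drop]
  omega

-- unfolding lemmas for the WF-recursive helpers
theorem pvChunks_pos (L pad : Int) (b : List Int) (h : 1 ≤ L ∧ L ≤ (b.length : Int)) :
    pvChunks L pad b = b.take L.toNat :: pvChunks L pad (b.drop L.toNat) := by
  rw [pvChunks]; simp [h]

theorem pvChunks_neg (L pad : Int) (b : List Int) (h : ¬(1 ≤ L ∧ L ≤ (b.length : Int))) :
    pvChunks L pad b =
      if b = [] then [] else [b ++ List.replicate (L - (b.length : Int)).toNat pad] := by
  rw [pvChunks]; simp [h]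

theorem pvFull_pos (L : Int) (b : List Int) (h : 1 ≤ L ∧ L ≤ (b.length : Int)) :
    pvFull L b = b.take L.toNat :: pvFull L (b.drop L.toNat) := by
  rw [pvFull]; simp [h]

theorem pvFull_neg (L : Int) (b : List Int) (h : ¬(1 ≤ L ∧ L ≤ (b.length : Int))) :
    pvFull L b = [] := by
  rw [pvFull]; simp [h]

theorem pvRem_pos (L : Int) (b : List Int) (h : 1 ≤ L ∧ L ≤ (b.length : Int)) :
    pvRem L b = pvRem L (b.drop L.toNat) := by
  rw [pvRem]; simp [h]

theorem pvRem_neg (L : Int) (b : List Int) (h : ¬(1 ≤ L ∧ L ≤ (b.length : Int))) :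
    pvRem L b = b := by
  rw [pvRem]; simp [h]

theorem pvRem_length_aux (L : Int) (hL : 1 ≤ L) :
    ∀ (n : Nat) (b : List Int), b.length ≤ n → ((pvRem L b).length : Int) < L := by
  intro n
  induction n with
  | zero =>
    intro b hb
    rw [pvRem_neg L b (by omega)]
    omega
  | succ m ih =>
    intro b hb
    by_cases hc : L ≤ (b.length : Int)
    · rw [pvRem_pos L b ⟨hL, hc⟩]
      exact ih _ (by simp only [List.length_drop]; omega)
    · rw [pvRem_neg L b (by omega)]
      omega

theorem pvRem_length (L : Int) (b : List Int) (hL : 1 ≤ L) : ((pvRem L b).length : Int) < L :=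
  pvRem_length_aux L hL b.length b le_rfl

theorem pvChunks_eq_aux (L pad : Int) (hL : 1 ≤ L) :
    ∀ (n : Nat) (b : List Int), b.length ≤ n →
    pvChunks L pad b = pvFull L b ++
      (if pvRem L b = [] then [] else
        [pvRem L b ++ List.replicate (L - ((pvRem L b).length : Int)).toNat pad]) := by
  intro n
  induction n with
  | zero =>
    intro b hb
    have hb0 : b = [] := List.eq_nil_of_length_eq_zero (by omega)
    subst hb0
    rw [pvChunks_neg L pad [] (by simp; omega), pvFull_neg L [] (by simp; omega),
        pvRem_neg L [] (by simp; omega)]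
    simp
  | succ m ih =>
    intro b hb
    by_cases hc : L ≤ (b.length : Int)
    · rw [pvChunks_pos L pad b ⟨hL, hc⟩, pvFull_pos L b ⟨hL, hc⟩, pvRem_pos L b ⟨hL, hc⟩,
          ih _ (by simp only [List.length_drop]; omega)]
      simp
    · rw [pvChunks_neg L pad b (by omega), pvFull_neg L b (by omega), pvRem_neg L b (by omega)]
      by_cases hb0 : b = [] <;> simp [hb0]

theorem pvChunks_eq (L pad : Int) (b : List Int) (hL : 1 ≤ L) :
    pvChunks L pad b = pvFull L b ++
      (if pvRem L b = [] then [] else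
        [pvRem L b ++ List.replicate (L - ((pvRem L b).length : Int)).toNat pad]) :=
  pvChunks_eq_aux L pad hL b.length b le_rfl

theorem pvFull_append_aux (L : Int) (y : List Int) (hL : 1 ≤ L) :
    ∀ (n : Nat) (b : List Int), b.length ≤ n →
    pvFull L (b ++ y) = pvFull L b ++ pvFull L (pvRem L b ++ y) ∧
    pvRem L (b ++ y) = pvRem L (pvRem L b ++ y) := by
  intro n
  induction n with
  | zero =>
    intro b hb
    have hb0 : b = [] := List.eq_nil_of_length_eq_zero (by omega)
    subst hb0
    rw [pvFull_neg L [] (by simp; omega), pvRem_neg L [] (by simp; omega)]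
    simp
  | succ m ih =>
    intro b hb
    by_cases hc : L ≤ (b.length : Int)
    · have h : 1 ≤ L ∧ L ≤ (b.length : Int) := ⟨hL, hc⟩
      have hby : 1 ≤ L ∧ L ≤ ((b ++ y).length : Int) := by
        simp only [List.length_append]; omega
      have htn : L.toNat ≤ b.length := by omega
      have hrec := ih (b.drop L.toNat) (by simp only [List.length_drop]; omega)
      rw [pvFull_pos L (b ++ y) hby, pvRem_pos L (b ++ y) hby, pvFull_pos L b h, pvRem_pos L b h,
          List.take_append_of_le_length htn, List.drop_append_of_le_length htn]
      exact ⟨by rw [hrec.1]; simp, hrec.2⟩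
    · rw [pvFull_neg L b (by omega), pvRem_neg L b (by omega)]
      simp

theorem pvFull_append (L : Int) (b y : List Int) (hL : 1 ≤ L) :
    pvFull L (b ++ y) = pvFull L b ++ pvFull L (pvRem L b ++ y) ∧
    pvRem L (b ++ y) = pvRem L (pvRem L b ++ y) :=
  pvFull_append_aux L y hL b.length b le_rfl

theorem pvAWhile_eq (L : Int) (hL : 1 ≤ L) (fuel : Nat) (b : List Int) (res : List (List Int))
    (hf : b.length < fuel) :
    pvAWhile fuel L res b = (res ++ pvFull L b, pvRem L b) := by
  induction fuel generalizing b res with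
  | zero => omega
  | succ f ih =>
    simp only [pvAWhile]
    by_cases hc : L ≤ (b.length : Int)
    · have h : 1 ≤ L ∧ L ≤ (b.length : Int) := ⟨hL, hc⟩
      rw [if_pos hc, PySem.List.slice_to b (by omega), PySem.List.slice_from b (by omega),
          ih (b.drop L.toNat) _ (by simp only [List.length_drop]; omega),
          pvFull_pos L b h, pvRem_pos L b h]
      simp
    · rw [if_neg hc, pvFull_neg L b (by omega), pvRem_neg L b (by omega)]
      simp

theorem pvBWhile_stop (L pad : Int) (fuel : Nat) (F : List Int) (i : Int)
    (out : List (List Int)) (h : ¬ i < (F.length : Int)) :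
    pvBWhile fuel L pad F i out = out := by
  cases fuel with
  | zero => rfl
  | succ f => simp only [pvBWhile, if_neg h]

theorem pvBWhile_eq (L pad : Int) (hL : 1 ≤ L) (fuel : Nat) (F : List Int) (i : Int)
    (out : List (List Int)) (hi : 0 ≤ i) (hf : (F.length : Int) - i < (fuel : Int)) :
    pvBWhile fuel L pad F i out = out ++ pvChunks L pad (F.drop i.toNat) := by
  induction fuel generalizing i out with
  | zero =>
    rw [pvBWhile_stop L pad 0 F i out (by omega),
        List.drop_eq_nil_of_le (by omega : F.length ≤ i.toNat),
        pvChunks_neg L pad [] (by simp; omega)]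
    simp
  | succ f ih =>
    by_cases hc : i < (F.length : Int)
    · simp only [pvBWhile, if_pos hc]
      set r := F.drop i.toNat with hr
      have hrlen : (r.length : Int) = (F.length : Int) - i := by
        rw [hr]; simp only [List.length_drop]; omega
      have hchunk : PySem.List.slice F (some i) (some (i + L)) = r.take L.toNat := by
        rw [PySem.List.slice_toNat F hi (by omega), hr]
        congr 1
        omega
      by_cases hfull : L ≤ (r.length : Int)
      · have hlen : ((r.take L.toNat).length : Int) = L := by
          simp only [List.length_take]; omega
        have hdrop : F.drop (i + L).toNat = r.drop L.toNat := by
          rw [hr, List.drop_drop]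
          congr 1
          omega
        rw [hchunk, hlen]
        simp only [sub_self, Int.toNat_zero, List.replicate_zero, List.append_nil]
        rw [ih (i + L) _ (by omega) (by omega), hdrop,
            pvChunks_pos L pad r ⟨hL, hfull⟩]
        simp
      · have htake : r.take L.toNat = r := List.take_of_length_le (by omega)
        rw [hchunk, htake]
        rw [pvBWhile_stop L pad f F (i + L) _ (by omega),
            pvChunks_neg L pad r (by omega)]
        have hne : r ≠ [] := by
          intro hnil
          rw [hnil] at hrlen
          simp at hrlen
          omega
        simp [hne]
    · rw [pvBWhile_stop L pad (f + 1) F i out hc,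
          List.drop_eq_nil_of_le (by omega : F.length ≤ i.toNat),
          pvChunks_neg L pad [] (by simp; omega)]
      simp

theorem pvAConcat_eq (L eos : Int) (hL : 1 ≤ L) (cs : List (List Int)) (res : List (List Int))
    (block : List Int) (hb : (block.length : Int) < L) :
    cs.foldl (fun (st : List (List Int) × List Int) batch =>
        let blk := st.2 ++ (batch ++ [eos])
        pvAWhile (blk.length + 1) L st.1 blk) (res, block) =
      (res ++ pvFull L (block ++ cs.flatMap (fun b => b ++ [eos])),
       pvRem L (block ++ cs.flatMap (fun b => b ++ [eos]))) := by
  induction cs generalizing res block with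
  | nil =>
    simp only [List.foldl_nil, List.flatMap_nil, List.append_nil]
    rw [pvFull_neg L block (by omega), pvRem_neg L block (by omega)]
    simp
  | cons c cs ih =>
    simp only [List.foldl_cons]
    rw [pvAWhile_eq L hL _ _ _ (Nat.lt_succ_self _),
        ih _ _ (pvRem_length L _ hL)]
    have h := pvFull_append L (block ++ (c ++ [eos])) (cs.flatMap (fun b => b ++ [eos])) hL
    rw [Prod.mk.injEq]
    constructor
    · rw [List.append_assoc res, ← h.1]
      simp [List.flatMap_cons, List.append_assoc]
    · rw [← h.2]
      simp [List.flatMap_cons, List.append_assoc]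

-- the two classification folds, characterised
theorem classifyA_eq (L t : Int) (value : List (List Int)) (a b : List (List Int)) :
    value.foldl (fun (pc : List (List Int) × List (List Int)) batch =>
        if |(batch.length : Int) - L| <= t then (pc.1 ++ [batch], pc.2)
        else (pc.1, pc.2 ++ [batch])) (a, b) =
      (a ++ value.filter (fun batch => decide (|(batch.length : Int) - L| <= t)),
       b ++ value.filter (fun batch => !decide (|(batch.length : Int) - L| <= t))) := by
  induction value generalizing a b with
  | nil => simp
  | cons v vs ih =>
    simp only [List.foldl_cons]
    by_cases hv : |(v.length : Int) - L| <= t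
    · rw [if_pos hv, ih]
      simp [hv]
    · rw [if_neg hv, ih]
      simp [hv]

theorem classifyB_eq (L t eos pad : Int) (value : List (List Int)) (a : List (List Int))
    (b : List Int) :
    value.foldl (fun (st : List (List Int) × List Int) batch =>
        if |(batch.length : Int) - L| <= t then
          (st.1 ++ [batch ++ List.replicate (L - (batch.length : Int)).toNat pad], st.2)
        else (st.1, st.2 ++ batch ++ [eos])) (a, b) =
      (a ++ (value.filter (fun batch => decide (|(batch.length : Int) - L| <= t))).map
          (fun batch => batch ++ List.replicate (L - (batch.length : Int)).toNat pad),
       b ++ (value.filter (fun batch => !decide (|(batch.length : Int) - L| <= t))).flatMap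
          (fun batch => batch ++ [eos])) := by
  induction value generalizing a b with
  | nil => simp
  | cons v vs ih =>
    simp only [List.foldl_cons]
    by_cases hv : |(v.length : Int) - L| <= t
    · rw [if_pos hv, ih]
      simp [hv, List.append_assoc]
    · rw [if_neg hv, ih]
      simp [hv, List.append_assoc]

-- per-key equality of A's three-phase body and B's one-pass body
theorem perKey_eq (L t eos pad : Int) (value : List (List Int))
    (h : 1 ≤ L ∨ ∀ batch ∈ value, |(batch.length : Int) - L| ≤ t) :
    (let pc := value.foldl (fun (pc : List (List Int) × List (List Int)) batch =>
        if |(batch.length : Int) - L| ≤ t then (pc.1 ++ [batch], pc.2)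
        else (pc.1, pc.2 ++ [batch])) ([], [])
     let res1 := pc.1.foldl (fun res batch =>
        res ++ [batch ++ List.replicate (L - (batch.length : Int)).toNat pad]) []
     let st := pc.2.foldl (fun (st : List (List Int) × List Int) batch =>
        let block := st.2 ++ (batch ++ [eos])
        pvAWhile (block.length + 1) L st.1 block) (res1, [])
     if st.2 ≠ [] then
        st.1 ++ [st.2 ++ List.replicate (L - (st.2.length : Int)).toNat pad]
     else st.1) =
    (let st := value.foldl (fun (st : List (List Int) × List Int) batch =>
        if |(batch.length : Int) - L| ≤ t then
          (st.1 ++ [batch ++ List.replicate (L - (batch.length : Int)).toNat pad], st.2)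
        else (st.1, st.2 ++ batch ++ [eos])) ([], [])
     pvBWhile (st.2.length + 1) L pad st.2 0 st.1) := by
  simp only [classifyA_eq, classifyB_eq, List.nil_append]
  rw [PySem.List.foldl_append_singleton_eq_map, List.nil_append]
  rcases h with hL | hall
  · -- seq_length >= 1: both sides chunk the same flat token list
    rw [pvAConcat_eq L eos hL _ _ [] (by simpa using hL)]
    rw [pvBWhile_eq L pad hL _ _ 0 _ le_rfl (by omega)]
    simp only [List.nil_append, Int.toNat_zero, List.drop_zero]
    rw [pvChunks_eq L pad _ hL]
    by_cases hrem :
        pvRem L ((value.filter (fun batch => !decide (|(batch.length : Int) - L| ≤ t))).flatMap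
          (fun batch => batch ++ [eos])) = [] <;>
      simp [hrem]
  · -- every batch is within threshold: nothing is concatenated, no chunking happens
    have hfilter : value.filter (fun batch => !decide (|(batch.length : Int) - L| ≤ t)) = [] := by
      rw [List.filter_eq_nil_iff]
      intro batch hmem
      simp [hall batch hmem]
    rw [hfilter]
    simp [pvBWhile]

-- ===== VERDICT (by name: the statement is the Claim_ definition above) =====
theorem constant_length_dataset_spec : Claim_equal_constant_length_dataset := by
  intro x L t eos pad _hdom hpre
  show constant_length_dataset x L t eos pad = constant_length_dataset_alt x L t eos pad
  unfold constant_length_dataset constant_length_dataset_alt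
  apply PySem.List.foldl_congr_mem
  intro acc kv hmem
  have hkey : 1 ≤ L ∨ ∀ batch ∈ kv.2, |(batch.length : Int) - L| ≤ t :=
    hpre.imp id (fun h => h kv hmem)
  have hpk := perKey_eq L t eos pad kv.2 hkey
  simp only [hpk]
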